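-- pv_equiv track=rewrite | github.com/mnot/compression-test | compressor/http2/__init__.py | join_headers
-- ===== SOURCE A (Python) =====
-- def join_headers(lst):
--   d = {}
--   for k, v in lst:
--     if k in d:
--       if k == "cookie":
--         d[k] += ";" + v
--       else:
--         d[k] += "\0" + v
--     else:
--       d[k] = v
--   return d
-- ===== SOURCE B (Python) =====
-- def join_headers(lst):
--   groups = {}
--   for k, v in lst:
--     groups.setdefault(k, []).append(v)
--   return {k: (";" if k == "cookie" else "\0").join(vs) for k, vs in groups.items()}
-- ===== Notes on version B (the rewrite author's own statement) =====
-- stated objective: alternative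
-- what changed: B replaces A's incremental per-item string concatenation into the dict with a group-then-join reduction: a first pass builds an ordered dict of value lists via setdefault, a second pass joins each group with ';' (cookie) or '\0' at once.
import Mathlib
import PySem

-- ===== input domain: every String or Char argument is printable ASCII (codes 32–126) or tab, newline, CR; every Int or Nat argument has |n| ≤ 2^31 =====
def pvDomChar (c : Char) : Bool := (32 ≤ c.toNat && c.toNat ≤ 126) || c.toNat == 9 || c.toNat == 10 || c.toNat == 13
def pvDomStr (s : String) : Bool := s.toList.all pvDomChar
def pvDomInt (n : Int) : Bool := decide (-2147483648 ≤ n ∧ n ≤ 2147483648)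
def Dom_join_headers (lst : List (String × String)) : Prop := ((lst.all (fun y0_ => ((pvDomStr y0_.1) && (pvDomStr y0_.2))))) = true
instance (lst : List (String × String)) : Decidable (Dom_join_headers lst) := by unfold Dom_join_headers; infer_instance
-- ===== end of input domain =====

-- B re-implements A's incremental in/else concatenation as a group-then-join reduction
-- (first pass groups values per key in first-seen order, second pass joins each group).

-- ===== PORT A =====
def join_headers (lst : List (String × String)) : List (String × String) :=
  (lst.foldl (fun (d : PySem.Dict String String) kv =>
    if d.contains kv.1 then
      if kv.1 == "cookie" then
        d.insert kv.1 (d.getD kv.1 "" ++ (";" ++ kv.2))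
      else
        d.insert kv.1 (d.getD kv.1 "" ++ ("\x00" ++ kv.2))
    else
      d.insert kv.1 kv.2) PySem.Dict.empty).items

-- ===== PORT B =====
def hdrSep (k : String) : String := if k == "cookie" then ";" else "\x00"

def join_headers_alt (lst : List (String × String)) : List (String × String) :=
  let groups := lst.foldl
    (fun (d : PySem.Dict String (List String)) kv => d.modify kv.1 [] (· ++ [kv.2]))
    PySem.Dict.empty
  groups.items.map (fun p => (p.1, PySem.Str.join (hdrSep p.1) p.2))

-- ===== PRECONDITION & SPEC =====
def Spec_join_headers (lst : List (String × String)) (out : List (String × String)) : Prop := out = join_headers_alt lst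
instance (lst : List (String × String)) (out : List (String × String)) : Decidable (Spec_join_headers lst out) := by unfold Spec_join_headers; infer_instance

-- ===== CLAIM (what is proved, stated in full; the proofs are below) =====
def Claim_equal_join_headers : Prop := ∀ (lst : List (String × String)), Dom_join_headers lst → Spec_join_headers lst (join_headers lst)

-- ===== LEMMAS AND PROOFS =====

-- the value transform B applies to each group
def hdrF (p : String × List String) : String × String := (p.1, PySem.Str.join (hdrSep p.1) p.2)

lemma contains_mk_map (l : List (String × List String)) (k : String) :
    (PySem.Dict.mk (l.map hdrF)).contains k = (PySem.Dict.mk l).contains k := by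
  simp only [PySem.Dict.contains, List.any_map]
  congr 1

lemma get?_mk_map (l : List (String × List String)) (k : String) :
    (PySem.Dict.mk (l.map hdrF)).get? k
      = ((PySem.Dict.mk l).get? k).map (fun vs => PySem.Str.join (hdrSep k) vs) := by
  induction l with
  | nil => simp [PySem.Dict.get?]
  | cons a t ih =>
    rw [List.map_cons, PySem.Dict.get?_mk_cons, PySem.Dict.get?_mk_cons]
    by_cases h : a.1 = k
    · subst h; simp [hdrF]
    · simp [hdrF, h, ih]

lemma str_join_singleton (sep v : String) : PySem.Str.join sep [v] = v := by
  apply String.toList_inj.mp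
  simp [PySem.Str.toList_join, PySem.Chars.join_singleton]

lemma chars_join_append (sep v : List Char) (l : List (List Char)) (h : l ≠ []) :
    PySem.Chars.join sep (l ++ [v]) = PySem.Chars.join sep l ++ (sep ++ v) := by
  induction l with
  | nil => exact absurd rfl h
  | cons a t ih =>
    cases t with
    | nil => simp [PySem.Chars.join_cons_cons, PySem.Chars.join_singleton]
    | cons b r =>
      rw [List.cons_append, List.cons_append, PySem.Chars.join_cons_cons,
        ← List.cons_append, ih (by simp), PySem.Chars.join_cons_cons]
      simp [List.append_assoc]

lemma str_join_append (sep v : String) (l : List String) (h : l ≠ []) :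
    PySem.Str.join sep (l ++ [v]) = PySem.Str.join sep l ++ (sep ++ v) := by
  apply String.toList_inj.mp
  simp only [PySem.Str.toList_join, List.map_append, List.map_cons, List.map_nil,
    String.toList_append]
  exact chars_join_append sep.toList v.toList (l.map String.toList) (by simpa using h)

-- the two fold steps
def stepA (d : PySem.Dict String String) (kv : String × String) : PySem.Dict String String :=
  if d.contains kv.1 then
    if kv.1 == "cookie" then
      d.insert kv.1 (d.getD kv.1 "" ++ (";" ++ kv.2))
    else
      d.insert kv.1 (d.getD kv.1 "" ++ ("\x00" ++ kv.2))
  else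
    d.insert kv.1 kv.2

def stepB (d : PySem.Dict String (List String)) (kv : String × String) :
    PySem.Dict String (List String) :=
  d.modify kv.1 [] (· ++ [kv.2])

lemma join_headers_eq_foldl (lst : List (String × String)) :
    join_headers lst = ((lst.foldl stepA PySem.Dict.empty)).items := rfl

lemma join_headers_alt_eq_foldl (lst : List (String × String)) :
    join_headers_alt lst = ((lst.foldl stepB PySem.Dict.empty)).items.map hdrF := rfl

lemma main_invariant (lst : List (String × String)) :
    ∀ (g : PySem.Dict String (List String)), g.keys.Nodup →
      (∀ p ∈ g.items, p.2 ≠ []) →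
      lst.foldl stepA (PySem.Dict.mk (g.items.map hdrF))
        = PySem.Dict.mk (((lst.foldl stepB g).items).map hdrF) := by
  induction lst with
  | nil => intro g _ _; rfl
  | cons kv t ih =>
    intro g hnd hne
    obtain ⟨k, v⟩ := kv
    by_cases hc : g.contains k = true
    · -- existing key: A appends to the joined string, B appends to the group
      obtain ⟨vs, hvs⟩ : ∃ vs, g.get? k = some vs := by
        have := PySem.Dict.contains_eq_isSome_get? (d := g) (k := k)
        rw [hc] at this
        exact Option.isSome_iff_exists.mp this.symm
      have hget : (PySem.Dict.mk (g.items.map hdrF)).getD k ""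
          = PySem.Str.join (hdrSep k) vs := by
        simp [PySem.Dict.getD, get?_mk_map, hvs]
      have hcA : (PySem.Dict.mk (g.items.map hdrF)).contains k = true := by
        rw [contains_mk_map]; exact hc
      have hvs_ne : vs ≠ [] := hne (k, vs) (PySem.Dict.mem_items_of_get?_eq_some _ hvs)
      have hstepA : stepA (PySem.Dict.mk (g.items.map hdrF)) (k, v)
          = (PySem.Dict.mk (g.items.map hdrF)).insert k
              (PySem.Str.join (hdrSep k) (vs ++ [v])) := by
        rw [str_join_append _ _ _ hvs_ne]
        simp only [stepA, hcA, if_true, hget]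
        by_cases hk : k = "cookie" <;> simp [hk, hdrSep]
      have hstepB : stepB g (k, v) = g.insert k (vs ++ [v]) := by
        simp [stepB, PySem.Dict.modify, PySem.Dict.getD, hvs]
      rw [List.foldl_cons, List.foldl_cons, hstepA, hstepB]
      have hmapped : ((PySem.Dict.mk (g.items.map hdrF)).insert k
            (PySem.Str.join (hdrSep k) (vs ++ [v])))
          = PySem.Dict.mk ((g.insert k (vs ++ [v])).items.map hdrF) := by
        apply PySem.Dict.ext
        rw [PySem.Dict.items_insert_of_contains _ _ hcA,
          show (PySem.Dict.mk ((g.insert k (vs ++ [v])).items.map hdrF)).items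
            = (g.insert k (vs ++ [v])).items.map hdrF from rfl,
          PySem.Dict.items_insert_of_contains _ _ hc]
        show (g.items.map hdrF).map _ = _
        rw [List.map_map, List.map_map]
        apply List.map_congr_left
        intro p _
        by_cases hp : p.1 = k
        · simp [Function.comp, hdrF, hp]
        · simp [Function.comp, hdrF, hp]
      rw [hmapped, ih]
      · exact PySem.Dict.nodup_keys_insert _ _ _ hnd
      · intro p hp
        rcases (PySem.Dict.mem_items_insert _ _ _ _).mp hp with h | ⟨h, _⟩
        · subst h; simp
        · exact hne p h
    · -- fresh key: both sides append a new entry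
      have hcA : (PySem.Dict.mk (g.items.map hdrF)).contains k = false := by
        rw [contains_mk_map]; exact Bool.eq_false_iff.mpr hc
      have hstepA : stepA (PySem.Dict.mk (g.items.map hdrF)) (k, v)
          = PySem.Dict.mk (g.items.map hdrF ++ [(k, v)]) := by
        apply PySem.Dict.ext
        rw [show stepA (PySem.Dict.mk (g.items.map hdrF)) (k, v)
            = (PySem.Dict.mk (g.items.map hdrF)).insert k v from by
          unfold stepA; rw [hcA]; simp]
        simpa using PySem.Dict.items_insert_of_not_contains _ v hcA
      have hstepB : stepB g (k, v) = PySem.Dict.mk (g.items ++ [(k, [v])]) := by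
        have h0 : g.getD k [] = [] := by
          simp [PySem.Dict.getD,
            (PySem.Dict.get?_eq_none_iff_contains g k).mpr (Bool.eq_false_iff.mpr hc)]
        apply PySem.Dict.ext
        rw [show stepB g (k, v) = g.insert k (g.getD k [] ++ [v]) from rfl, h0]
        simpa using PySem.Dict.items_insert_of_not_contains g [v] (Bool.eq_false_iff.mpr hc)
      rw [List.foldl_cons, List.foldl_cons, hstepA, hstepB]
      have hmap : g.items.map hdrF ++ [(k, v)]
          = (g.items ++ [(k, [v])]).map hdrF := by
        simp [hdrF, str_join_singleton]
      have hitems : (g.insert k [v]).items = g.items ++ [(k, [v])] :=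
        PySem.Dict.items_insert_of_not_contains g [v] (Bool.eq_false_iff.mpr hc)
      rw [hmap, ← hitems]
      have hmk : PySem.Dict.mk (g.insert k [v]).items = g.insert k [v] := rfl
      rw [hmk, ih]
      · exact PySem.Dict.nodup_keys_insert _ _ _ hnd
      · intro p hp
        rcases (PySem.Dict.mem_items_insert _ _ _ _).mp hp with h | ⟨h, _⟩
        · subst h; simp
        · exact hne p h

-- ===== VERDICT (by name: the statement is the Claim_ definition above) =====
theorem join_headers_spec : Claim_equal_join_headers := by
  intro lst _
  show join_headers lst = join_headers_alt lst
  rw [join_headers_eq_foldl, join_headers_alt_eq_foldl]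
  have h := main_invariant lst PySem.Dict.empty (by simp) (by simp [PySem.Dict.empty])
  have he : PySem.Dict.empty = PySem.Dict.mk (((PySem.Dict.empty : PySem.Dict String (List String))).items.map hdrF) := by
    rfl
  rw [he, h]
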